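-- pv_equiv track=rewrite | github.com/LutovaDaria/Alg_4353_Lutova_lab2_sem4 | main_codec.py | rle_ac_encode
-- ===== SOURCE A (Python) =====
-- def rle_ac_encode(ac63: list[int]) -> list[tuple[int, int]]:
--     # ZRL=(15,0), EOB=(0,0)
--     result = []
--     zero_count = 0
--     for coef in ac63:
--         coef = int(coef)
--         if coef == 0:
--             zero_count += 1
--             if zero_count == 16:
--                 result.append((15, 0))
--                 zero_count = 0
--         else:
--             result.append((zero_count, coef))
--             zero_count = 0
--     result.append((0, 0))
--     return result
-- ===== SOURCE B (Python) =====
-- def rle_ac_encode(ac63: list[int]) -> list[tuple[int, int]]: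
--     # Gap-based encoder: skip to the next nonzero, emit divmod(gap,16) ZRLs
--     # instead of keeping a running zero counter with an inline flush.
--     result = []
--     vals = [int(x) for x in ac63]
--     n = len(vals)
--     i = 0
--     while True:
--         j = i
--         while j < n and vals[j] == 0:
--             j += 1
--         if j == n:
--             result += [(15, 0)] * ((n - i) // 16)
--             break
--         q, r = divmod(j - i, 16)
--         result += [(15, 0)] * q
--         result.append((r, vals[j]))
--         i = j + 1
--     result.append((0, 0))
--     return result
-- ===== Notes on version B (the rewrite author's own statement) =====
-- stated objective: alternative
-- what changed: Replaces A's per-element running zero counter with inline flush by a gap-based scan: skip to the next nonzero, emit divmod(gap,16) ZRL pairs plus (gap%16, coef), and len(rest)//16 ZRLs for the trailing zeros.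
import Mathlib
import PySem

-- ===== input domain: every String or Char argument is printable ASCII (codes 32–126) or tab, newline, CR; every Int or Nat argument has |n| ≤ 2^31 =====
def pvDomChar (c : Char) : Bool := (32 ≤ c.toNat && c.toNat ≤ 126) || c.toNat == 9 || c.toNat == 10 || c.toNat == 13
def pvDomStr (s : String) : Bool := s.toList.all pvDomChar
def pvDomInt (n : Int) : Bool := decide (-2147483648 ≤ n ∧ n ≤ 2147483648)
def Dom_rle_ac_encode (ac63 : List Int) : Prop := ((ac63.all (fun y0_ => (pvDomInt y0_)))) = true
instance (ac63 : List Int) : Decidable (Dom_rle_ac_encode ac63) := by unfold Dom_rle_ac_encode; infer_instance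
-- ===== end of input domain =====

-- B replaces A's per-element zero counter with a skip-to-next-nonzero gap scan
-- plus divmod(gap, 16) arithmetic (objective: alternative decomposition).

-- ===== PORT A =====
def pvAStep (st : List (Int × Int) × Int) (coef : Int) : List (Int × Int) × Int :=
  let (result, zc) := st
  if coef = 0 then
    if zc + 1 = 16 then (result ++ [((15 : Int), (0 : Int))], 0) else (result, zc + 1)
  else (result ++ [(zc, coef)], 0)

def rle_ac_encode (ac63 : List Int) : List (Int × Int) :=
  (ac63.foldl pvAStep ([], 0)).1 ++ [((0 : Int), (0 : Int))]

-- ===== PORT B =====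
-- the inner `while` of B: index of the first nonzero (or len(rest))
def pvGap (rest : List Int) : Nat := (rest.takeWhile (fun x => x = 0)).length

theorem pvGap_le (rest : List Int) : pvGap rest ≤ rest.length := by
  induction rest with
  | nil => simp [pvGap]
  | cons c t ih =>
    by_cases hc : c = 0
    · simp [pvGap, List.takeWhile, hc] at ih ⊢; omega
    · simp [pvGap, List.takeWhile, hc]

def pvBLoop (rest : List Int) : List (Int × Int) :=
  match h : rest.drop (pvGap rest) with
  | [] => List.replicate (rest.length / 16) ((15 : Int), (0 : Int))
  | c :: t =>
      List.replicate (pvGap rest / 16) ((15 : Int), (0 : Int)) ++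
        (((pvGap rest % 16 : Nat) : Int), c) :: pvBLoop t
termination_by rest.length
decreasing_by
  have h1 : rest.length - pvGap rest = (c :: t).length := by rw [← h, List.length_drop]
  have h2 := pvGap_le rest
  simp at h1; omega

def rle_ac_encode_alt (ac63 : List Int) : List (Int × Int) :=
  pvBLoop ac63 ++ [((0 : Int), (0 : Int))]

-- ===== PRECONDITION & SPEC =====
def Spec_rle_ac_encode (ac63 : List Int) (out : List (Int × Int)) : Prop := out = rle_ac_encode_alt ac63
instance (ac63 : List Int) (out : List (Int × Int)) : Decidable (Spec_rle_ac_encode ac63 out) := by unfold Spec_rle_ac_encode; infer_instance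

-- ===== CLAIM (what is proved, stated in full; the proofs are below) =====
def Claim_equal_rle_ac_encode : Prop := ∀ (ac63 : List Int), Dom_rle_ac_encode ac63 → Spec_rle_ac_encode ac63 (rle_ac_encode ac63)

-- ===== LEMMAS AND PROOFS =====

-- proof-side recursive reading of A's loop
def pvG : Int → List Int → List (Int × Int)
  | _, [] => []
  | zc, c :: t =>
    if c = 0 then
      (if zc + 1 = 16 then ((15 : Int), (0 : Int)) :: pvG 0 t else pvG (zc + 1) t)
    else (zc, c) :: pvG 0 t

-- B's loop generalized by a pending zero count carried in from the left
def pvBAux (z : Nat) (rest : List Int) : List (Int × Int) :=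
  match h : rest.drop (pvGap rest) with
  | [] => List.replicate ((z + rest.length) / 16) ((15 : Int), (0 : Int))
  | c :: t =>
      List.replicate ((z + pvGap rest) / 16) ((15 : Int), (0 : Int)) ++
        ((((z + pvGap rest) % 16 : Nat) : Int), c) :: pvBAux 0 t
termination_by rest.length
decreasing_by
  have h1 : rest.length - pvGap rest = (c :: t).length := by rw [← h, List.length_drop]
  have h2 := pvGap_le rest
  simp at h1; omega

theorem pvGap_cons_zero (t : List Int) : pvGap ((0 : Int) :: t) = pvGap t + 1 := by
  simp [pvGap, List.takeWhile]

theorem pvGap_cons_ne (c : Int) (t : List Int) (hc : c ≠ 0) : pvGap (c :: t) = 0 := by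
  simp [pvGap, List.takeWhile, hc]

theorem pvBAux_eq_nil (z : Nat) (rest : List Int)
    (h : rest.drop (pvGap rest) = []) :
    pvBAux z rest = List.replicate ((z + rest.length) / 16) ((15 : Int), (0 : Int)) := by
  rw [pvBAux]
  split
  · rfl
  · next c t h2 => rw [h] at h2; cases h2

theorem pvBAux_eq_cons (z : Nat) (rest : List Int) (c : Int) (t : List Int)
    (h : rest.drop (pvGap rest) = c :: t) :
    pvBAux z rest = List.replicate ((z + pvGap rest) / 16) ((15 : Int), (0 : Int)) ++
      ((((z + pvGap rest) % 16 : Nat) : Int), c) :: pvBAux 0 t := by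
  rw [pvBAux]
  split
  · next h2 => rw [h] at h2; cases h2
  · next c' t' h2 =>
    rw [h] at h2
    cases h2
    rfl

theorem pvBLoop_eq_aux (rest : List Int) : pvBLoop rest = pvBAux 0 rest := by
  rw [pvBLoop]
  split
  · next h => rw [pvBAux_eq_nil 0 rest h]; simp
  · next c t h =>
    rw [pvBAux_eq_cons 0 rest c t h]
    have h1 : rest.length - pvGap rest = (c :: t).length := by rw [← h, List.length_drop]
    have h2 := pvGap_le rest
    have ht : t.length < rest.length := by simp at h1; omega
    rw [pvBLoop_eq_aux t]
    simp
termination_by rest.length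

theorem pvFoldG (l : List Int) : ∀ (acc : List (Int × Int)) (zc : Int),
    (l.foldl pvAStep (acc, zc)).1 = acc ++ pvG zc l := by
  induction l with
  | nil => intro acc zc; simp [pvG]
  | cons c t ih =>
    intro acc zc
    simp only [List.foldl_cons, pvAStep, pvG]
    by_cases hc : c = 0
    · by_cases hz : zc + 1 = 16
      · simp [hc, hz, ih]
      · simp [hc, hz, ih]
    · simp [hc, ih]

theorem pvG_eq_aux : ∀ rest : List Int, ∀ zc : Int, 0 ≤ zc → zc < 16 →
    pvG zc rest = pvBAux zc.toNat rest := by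
  intro rest
  induction rest with
  | nil =>
    intro zc h0 h16
    have hd : ([] : List Int).drop (pvGap []) = [] := by simp
    rw [pvBAux_eq_nil _ _ hd]
    have : (zc.toNat + ([] : List Int).length) / 16 = 0 := by simp; omega
    rw [this]
    simp [pvG]
  | cons c t ih =>
    intro zc h0 h16
    by_cases hc : c = 0
    · subst hc
      rcases hdt : t.drop (pvGap t) with _ | ⟨cc, tt⟩
      · -- all of t after its gap is empty: everything is zeros
        have hd : ((0 : Int) :: t).drop (pvGap ((0 : Int) :: t)) = [] := by
          rw [pvGap_cons_zero]; simpa using hdt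
        rw [pvBAux_eq_nil _ _ hd]
        by_cases hz : zc + 1 = 16
        · have hz15 : zc = 15 := by omega
          subst hz15
          simp only [pvG, if_pos hz]
          rw [ih 0 (by omega) (by omega), pvBAux_eq_nil _ _ hdt]
          have e : ((15 : Int).toNat + (t.length + 1)) / 16 = ((0 : Int).toNat + t.length) / 16 + 1 := by
            simp; omega
          simp only [List.length_cons, e, List.replicate_succ]
          simp
        · simp only [pvG, if_neg hz]
          rw [ih (zc + 1) (by omega) (by omega), pvBAux_eq_nil _ _ hdt]
          have e : (zc.toNat + (t.length + 1)) / 16 = ((zc + 1).toNat + t.length) / 16 := by omega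
          simp only [List.length_cons, e]
          simp
      · -- a nonzero cc follows the zeros of t
        have hd : ((0 : Int) :: t).drop (pvGap ((0 : Int) :: t)) = cc :: tt := by
          rw [pvGap_cons_zero]; simpa using hdt
        rw [pvBAux_eq_cons _ _ _ _ hd]
        by_cases hz : zc + 1 = 16
        · have hz15 : zc = 15 := by omega
          subst hz15
          simp only [pvG, if_pos hz]
          rw [ih 0 (by omega) (by omega), pvBAux_eq_cons _ _ _ _ hdt]
          rw [pvGap_cons_zero]
          have e1 : ((15 : Int).toNat + (pvGap t + 1)) / 16 = ((0 : Int).toNat + pvGap t) / 16 + 1 := by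
            simp; omega
          have e2 : ((15 : Int).toNat + (pvGap t + 1)) % 16 = ((0 : Int).toNat + pvGap t) % 16 := by
            simp; omega
          simp only [e1, e2, List.replicate_succ, List.cons_append]
          simp
        · simp only [pvG, if_neg hz]
          rw [ih (zc + 1) (by omega) (by omega), pvBAux_eq_cons _ _ _ _ hdt]
          rw [pvGap_cons_zero]
          have e1 : (zc.toNat + (pvGap t + 1)) / 16 = ((zc + 1).toNat + pvGap t) / 16 := by omega
          have e2 : (zc.toNat + (pvGap t + 1)) % 16 = ((zc + 1).toNat + pvGap t) % 16 := by omega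
          simp only [e1, e2]
          simp
    · -- head is nonzero: gap is 0, emit (zc, c)
      have hd : (c :: t).drop (pvGap (c :: t)) = c :: t := by
        rw [pvGap_cons_ne c t hc]; simp
      rw [pvBAux_eq_cons _ _ _ _ hd]
      rw [pvGap_cons_ne c t hc]
      have e1 : (zc.toNat + 0) / 16 = 0 := by omega
      have e2 : (((zc.toNat + 0) % 16 : Nat) : Int) = zc := by omega
      rw [e1, e2]
      simp only [pvG, if_neg hc, List.replicate_zero, List.nil_append]
      rw [ih 0 (by omega) (by omega)]
      rfl

-- ===== VERDICT (by name: the statement is the Claim_ definition above) =====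
theorem rle_ac_encode_spec : Claim_equal_rle_ac_encode := by
  intro ac63 _
  show rle_ac_encode ac63 = rle_ac_encode_alt ac63
  unfold rle_ac_encode rle_ac_encode_alt
  rw [pvFoldG, pvBLoop_eq_aux, pvG_eq_aux ac63 0 (by omega) (by omega)]
  rfl
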